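-- pv_equiv track=rewrite | github.com/ngthang2022/Nhung_nguoi_song_tinh_cam | scenes/maze_scene.py | compute_distance_to_target
-- ===== SOURCE A (Python) =====
-- from collections import deque
--
-- MAZE_SIZE = 30
--
-- def compute_distance_to_target(maze):
--     dis = [[-1 for _ in range(MAZE_SIZE)] for _ in range(MAZE_SIZE)]
--     for y in range(MAZE_SIZE):
--         for x in range(MAZE_SIZE):
--             if maze[y][x] == 'T':
--                 dis[y][x] = 0
--                 queue = deque([(x, y)])
--                 dx, dy = [0, 0, 1, -1], [1, -1, 0, 0]
--                 while queue:
--                     cx, cy = queue.popleft()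
--                     for d in range(4):
--                         nx, ny = cx + dx[d], cy + dy[d]
--                         if 0 <= nx < MAZE_SIZE and 0 <= ny < MAZE_SIZE and maze[ny][nx] != '#' and dis[ny][nx] == -1:
--                             dis[ny][nx] = dis[cy][cx] + 1
--                             queue.append((nx, ny))
--                 return dis
--     raise ValueError("No target 'T' found")
-- ===== SOURCE B (Python) =====
-- MAZE_SIZE = 30
--
-- def compute_distance_to_target(maze):
--     dis = [[-1] * MAZE_SIZE for _ in range(MAZE_SIZE)]
--     for y in range(MAZE_SIZE):
--         for x in range(MAZE_SIZE):
--             if maze[y][x] == 'T':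
--                 dis[y][x] = 0
--                 frontier = [(x, y)]
--                 d = 0
--                 while frontier:
--                     d += 1
--                     next_frontier = []
--                     for cx, cy in frontier:
--                         for nx, ny in ((cx, cy + 1), (cx, cy - 1), (cx + 1, cy), (cx - 1, cy)):
--                             if 0 <= nx < MAZE_SIZE and 0 <= ny < MAZE_SIZE and maze[ny][nx] != '#' and dis[ny][nx] == -1:
--                                 dis[ny][nx] = d
--                                 next_frontier.append((nx, ny))
--                     frontier = next_frontier
--                 return dis
--     raise ValueError("No target 'T' found")
-- ===== Notes on version B (the rewrite author's own statement) =====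
-- stated objective: alternative
-- what changed: Replaces the deque BFS that rereads the parent's stored distance on every relaxation with a level-synchronous BFS: a plain frontier list per level and a distance counter d, so distances come from the loop counter instead of dis[cy][cx]+1 and no deque/popleft is needed.
import Mathlib
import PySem

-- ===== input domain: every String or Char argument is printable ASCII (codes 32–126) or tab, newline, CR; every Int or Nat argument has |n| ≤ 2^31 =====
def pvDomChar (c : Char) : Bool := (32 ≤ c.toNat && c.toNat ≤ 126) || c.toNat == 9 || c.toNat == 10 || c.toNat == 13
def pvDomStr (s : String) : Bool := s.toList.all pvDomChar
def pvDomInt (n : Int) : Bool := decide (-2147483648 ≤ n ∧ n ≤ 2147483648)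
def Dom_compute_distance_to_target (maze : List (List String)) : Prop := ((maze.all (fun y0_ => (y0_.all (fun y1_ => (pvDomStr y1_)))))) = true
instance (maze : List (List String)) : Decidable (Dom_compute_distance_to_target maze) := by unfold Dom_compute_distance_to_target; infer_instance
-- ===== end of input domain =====

-- B replaces A's deque BFS (distance reread from dis[cy][cx]+1 at every relaxation) by a
-- level-synchronous frontier BFS with a level counter; same results, similar cost (objective: alternative).

-- ===== PORT A =====
-- shared low-level helpers (both Pythons contain the identical row-major scan and the same
-- nested subscripts): maze[y][x] / dis[y][x] reads and the in-place write dis[y][x] = v.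
-- All subscripts are guarded by 0 <= i < 30 range checks (and by Pre_ for the maze), so the
-- total pyGetD/pySetD forms are exact where Python does not raise.
def mget (maze : List (List String)) (y x : Int) : String :=
  PySem.List.pyGetD (PySem.List.pyGetD maze y []) x ""

def dget (dis : List (List Int)) (y x : Int) : Int :=
  PySem.List.pyGetD (PySem.List.pyGetD dis y []) x (-1)

def dset (dis : List (List Int)) (y x : Int) (v : Int) : List (List Int) :=
  PySem.List.pySetD dis y (PySem.List.pySetD (PySem.List.pyGetD dis y []) x v)

-- dis = [[-1 for _ in range(30)] for _ in range(30)]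
def pvDisInit : List (List Int) := List.replicate 30 (List.replicate 30 (-1))

-- the row-major search for the first 'T' (identical in both Pythons)
def findT (maze : List (List String)) : Option (Int × Int) :=
  (PySem.List.pyRange 0 30 1).findSome? fun y =>
    (PySem.List.pyRange 0 30 1).findSome? fun x =>
      if mget maze y x = "T" then some (x, y) else none

def dxs : List Int := [0, 0, 1, -1]
def dys : List Int := [1, -1, 0, 0]

-- one iteration of A's 'for d in range(4)' body, state = (dis, queue)
def bodyA (maze : List (List String)) (cx cy : Int)
    (st : List (List Int) × List (Int × Int)) (i : Int) :
    List (List Int) × List (Int × Int) :=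
  let nx := cx + (PySem.List.pyGet? dxs i).getD 0
  let ny := cy + (PySem.List.pyGet? dys i).getD 0
  if 0 ≤ nx ∧ nx < 30 ∧ 0 ≤ ny ∧ ny < 30 ∧ mget maze ny nx ≠ "#" ∧ dget st.1 ny nx = -1 then
    (dset st.1 ny nx (dget st.1 cy cx + 1), st.2 ++ [(nx, ny)])
  else st

-- A's 'while queue' loop; fuel only makes the recursion total (1000 > 900 possible
-- enqueues + 1, so it is never exhausted — proved via the pvPot potential below)
def bfsA (maze : List (List String)) : Nat → List (List Int) → List (Int × Int) → List (List Int)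
  | 0, dis, _ => dis
  | _ + 1, dis, [] => dis
  | f + 1, dis, (cx, cy) :: rest =>
    let st := (PySem.List.pyRange 0 4 1).foldl (bodyA maze cx cy) (dis, rest)
    bfsA maze f st.1 st.2

def compute_distance_to_target (maze : List (List String)) : List (List Int) :=
  match findT maze with
  | some (x, y) => bfsA maze 1000 (dset pvDisInit y x 0) [(x, y)]
  | none => []   -- Python raises ValueError("No target 'T' found") here; excluded by Pre_

-- ===== PORT B =====
-- one neighbour check of B: state = (dis, next_frontier), writes the level value d
def relaxB (maze : List (List String)) (d : Int)
    (st : List (List Int) × List (Int × Int)) (p : Int × Int) :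
    List (List Int) × List (Int × Int) :=
  if 0 ≤ p.1 ∧ p.1 < 30 ∧ 0 ≤ p.2 ∧ p.2 < 30 ∧ mget maze p.2 p.1 ≠ "#" ∧ dget st.1 p.2 p.1 = -1 then
    (dset st.1 p.2 p.1 d, st.2 ++ [p])
  else st

-- B's 'for nx, ny in ((cx, cy+1), (cx, cy-1), (cx+1, cy), (cx-1, cy))' body
def stepB (maze : List (List String)) (d : Int)
    (st : List (List Int) × List (Int × Int)) (c : Int × Int) :
    List (List Int) × List (Int × Int) :=
  [(c.1, c.2 + 1), (c.1, c.2 - 1), (c.1 + 1, c.2), (c.1 - 1, c.2)].foldl (relaxB maze d) st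

-- B's 'while frontier' loop: one iteration per LEVEL, distance = level counter d
def bfsB (maze : List (List String)) : Nat → List (List Int) → List (Int × Int) → Int → List (List Int)
  | 0, dis, _, _ => dis
  | f + 1, dis, frontier, d =>
    if frontier.isEmpty then dis
    else
      let st := frontier.foldl (stepB maze (d + 1)) (dis, ([] : List (Int × Int)))
      bfsB maze f st.1 st.2 (d + 1)

def compute_distance_to_target_alt (maze : List (List String)) : List (List Int) :=
  match findT maze with
  | some (x, y) => bfsB maze 1000 (dset pvDisInit y x 0) [(x, y)] 0
  | none => []   -- same ValueError in Source B; excluded by Pre_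

-- ===== PRECONDITION & SPEC =====
-- Pre_ is exactly A's no-raise condition (checked on the input grid alone): the row-major
-- scan reaches a 'T' without reading past the end of a short row, and every cell of the
-- T's connected region of non-'#' cells inside the 30x30 window (the cells the BFS visits,
-- a bounded graph-reachability closure of the input) has its in-window neighbours present.
-- Outside Pre_ Python A raises IndexError or ValueError("No target 'T' found").
def pvPreCell (maze : List (List String)) (y x : Nat) : Option String :=
  if x < (maze.getD y []).length then some ((maze.getD y []).getD x "") else none

def pvPreNbrs (c : Nat × Nat) : List (Nat × Nat) :=
  (if c.1 + 1 < 30 then [(c.1 + 1, c.2)] else []) ++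
  (if 1 ≤ c.1 then [(c.1 - 1, c.2)] else []) ++
  (if c.2 + 1 < 30 then [(c.1, c.2 + 1)] else []) ++
  (if 1 ≤ c.2 then [(c.1, c.2 - 1)] else [])

def pvPreOpen (maze : List (List String)) (n : Nat × Nat) : Bool :=
  match pvPreCell maze n.1 n.2 with
  | some s => s != "#"
  | none => false

def pvPreVisGet (vis : List (List Bool)) (c : Nat × Nat) : Bool := (vis.getD c.1 []).getD c.2 false

def pvPreVisSet (vis : List (List Bool)) (c : Nat × Nat) : List (List Bool) :=
  vis.set c.1 ((vis.getD c.1 []).set c.2 true)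

-- mark the connected region of the first 'T' (≤ 900 cells, so fuel 900 is never exhausted)
def pvPreGrow (maze : List (List String)) : Nat → List (List Bool) → List (Nat × Nat) → List (List Bool)
  | 0, vis, _ => vis
  | _ + 1, vis, [] => vis
  | f + 1, vis, fr =>
    let st := fr.foldl (fun (st : List (List Bool) × List (Nat × Nat)) c =>
      (pvPreNbrs c).foldl (fun st n =>
        if pvPreVisGet st.1 n = false ∧ pvPreOpen maze n = true then
          (pvPreVisSet st.1 n, st.2 ++ [n])
        else st) st) (vis, ([] : List (Nat × Nat)))
    pvPreGrow maze f st.1 st.2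

def pvPreVis (maze : List (List String)) : List (List Bool) :=
  match (List.range 30).findSome? (fun y =>
      (((maze.getD y []).take 30).findIdx? (fun s => s == "T")).map (fun x => ((y, x) : Nat × Nat))) with
  | some c => pvPreGrow maze 900 (pvPreVisSet (List.replicate 30 (List.replicate 30 false)) c) [c]
  | none => List.replicate 30 (List.replicate 30 false)

def Pre_compute_distance_to_target (maze : List (List String)) : Prop :=
  (∃ y ∈ List.range 30, "T" ∈ (maze.getD y []).take 30 ∧
      ∀ y' ∈ List.range y, 30 ≤ (maze.getD y' []).length) ∧
  (∀ y ∈ List.range 30, ∀ x ∈ List.range 30,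
    pvPreVisGet (pvPreVis maze) (y, x) = true →
      ∀ n ∈ pvPreNbrs (y, x), pvPreCell maze n.1 n.2 ≠ none)

instance (maze : List (List String)) : Decidable (Pre_compute_distance_to_target maze) := by
  unfold Pre_compute_distance_to_target; infer_instance

def pvWitness_compute_distance_to_target : List (List String) := [["T", "#"], ["#", "#"]]

def Spec_compute_distance_to_target (maze : List (List String)) (out : List (List Int)) : Prop :=
  out = compute_distance_to_target_alt maze
instance (maze : List (List String)) (out : List (List Int)) : Decidable (Spec_compute_distance_to_target maze out) := by
  unfold Spec_compute_distance_to_target; infer_instance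

-- ===== CLAIM (what is proved, stated in full; the proofs are below) =====
def Claim_equal_compute_distance_to_target : Prop :=
  ∀ (maze : List (List String)), Dom_compute_distance_to_target maze →
    Pre_compute_distance_to_target maze →
    Spec_compute_distance_to_target maze (compute_distance_to_target maze)

-- ===== LEMMAS AND PROOFS =====

-- proof-side notions
def pvShape (g : List (List Int)) : Prop := g.length = 30 ∧ ∀ r ∈ g, r.length = 30
def pvInv (g : List (List Int)) : Prop := ∀ r ∈ g, ∀ v ∈ r, -1 ≤ v
def pvPot (g : List (List Int)) : Nat := (g.map (fun r => r.countP (fun v => v == (-1 : Int)))).sum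
def pvInR (p : Int × Int) : Prop := 0 ≤ p.1 ∧ p.1 < 30 ∧ 0 ≤ p.2 ∧ p.2 < 30
def pvNbrs (c : Int × Int) : List (Int × Int) :=
  [(c.1, c.2 + 1), (c.1, c.2 - 1), (c.1 + 1, c.2), (c.1 - 1, c.2)]
def pvRfold (maze : List (List String)) (v : Int)
    (st : List (List Int) × List (Int × Int)) (ps : List (Int × Int)) :
    List (List Int) × List (Int × Int) :=
  ps.foldl (relaxB maze v) st

theorem pv_dget_norm (g : List (List Int)) (y x : Int) (hs : pvShape g)
    (hy : 0 ≤ y) (hy30 : y < 30) (hx : 0 ≤ x) (hx30 : x < 30) :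
    dget g y x = (g.getD y.toNat []).getD x.toNat (-1) := by
  obtain ⟨hl, hr⟩ := hs
  have h1 : y.toNat < g.length := by omega
  have h2 : x.toNat < (g[y.toNat]).length := by
    rw [hr _ (List.getElem_mem h1)]; omega
  unfold dget
  rw [PySem.List.pyGetD_eq_getElem g [] hy (by omega),
      PySem.List.pyGetD_eq_getElem _ _ hx (by omega),
      List.getD_eq_getElem g [] h1,
      List.getD_eq_getElem _ (-1) h2]

theorem pv_dset_norm (g : List (List Int)) (y x v : Int)
    (hy : 0 ≤ y) (hx : 0 ≤ x) (h1 : y.toNat < g.length) :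
    dset g y x v = g.set y.toNat (g[y.toNat].set x.toNat v) := by
  unfold dset
  rw [PySem.List.pyGetD_eq_getElem g [] hy (by omega),
      PySem.List.pySetD_of_nonneg _ _ hx, PySem.List.pySetD_of_nonneg _ _ hy]

theorem pv_shape_dset' (g : List (List Int)) (y x v : Int) (hs : pvShape g)
    (hy : 0 ≤ y) (hy30 : y < 30) (hx : 0 ≤ x) (hx30 : x < 30) :
    pvShape (dset g y x v) := by
  have h1 : y.toNat < g.length := by have := hs.1; omega
  rw [pv_dset_norm g y x v hy hx h1]
  refine ⟨by simpa using hs.1, ?_⟩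
  intro r hr
  rcases List.mem_or_eq_of_mem_set hr with h | h
  · exact hs.2 r h
  · subst h; simpa using hs.2 _ (List.getElem_mem h1)

theorem pv_dget_dset_self (g : List (List Int)) (y x v : Int) (hs : pvShape g)
    (hy : 0 ≤ y) (hy30 : y < 30) (hx : 0 ≤ x) (hx30 : x < 30) :
    dget (dset g y x v) y x = v := by
  have h1 : y.toNat < g.length := by have := hs.1; omega
  have h2 : x.toNat < (g[y.toNat]).length := by
    rw [hs.2 _ (List.getElem_mem h1)]; omega
  have hs' := pv_shape_dset' g y x v hs hy hy30 hx hx30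
  rw [pv_dget_norm _ y x hs' hy hy30 hx hx30, pv_dset_norm g y x v hy hx h1]
  rw [List.getD_eq_getElem _ [] (by simpa using h1), List.getElem_set_self,
      List.getD_eq_getElem _ (-1) (by simpa using h2), List.getElem_set_self]

theorem pv_dget_dset_ne (g : List (List Int)) (y x v y' x' : Int) (hs : pvShape g)
    (hy : 0 ≤ y) (hy30 : y < 30) (hx : 0 ≤ x) (hx30 : x < 30)
    (hy' : 0 ≤ y') (hy30' : y' < 30) (hx' : 0 ≤ x') (hx30' : x' < 30)
    (hne : ¬(y' = y ∧ x' = x)) :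
    dget (dset g y x v) y' x' = dget g y' x' := by
  have h1 : y.toNat < g.length := by have := hs.1; omega
  have h1' : y'.toNat < g.length := by have := hs.1; omega
  have h2' : x'.toNat < (g[y'.toNat]).length := by
    rw [hs.2 _ (List.getElem_mem h1')]; omega
  have hs' := pv_shape_dset' g y x v hs hy hy30 hx hx30
  rw [pv_dget_norm _ y' x' hs' hy' hy30' hx' hx30', pv_dget_norm g y' x' hs hy' hy30' hx' hx30',
      pv_dset_norm g y x v hy hx h1]
  by_cases hyy : y' = y
  · have hxx : x' ≠ x := fun h => hne ⟨hyy, h⟩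
    subst hyy
    rw [List.getD_eq_getElem _ [] (by simpa using h1), List.getElem_set_self,
        List.getD_eq_getElem g [] h1,
        List.getD_eq_getElem _ (-1) (by simpa using h2'),
        List.getD_eq_getElem _ (-1) h2',
        List.getElem_set_ne (by omega)]
  · rw [List.getD_eq_getElem _ [] (by simpa using h1'),
        List.getD_eq_getElem g [] h1',
        List.getElem_set_ne (by omega)]

theorem pv_inv_dset (g : List (List Int)) (y x v : Int) (hs : pvShape g) (hinv : pvInv g)
    (hy : 0 ≤ y) (hy30 : y < 30) (hx : 0 ≤ x) (hx30 : x < 30) (hv : -1 ≤ v) :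
    pvInv (dset g y x v) := by
  have h1 : y.toNat < g.length := by have := hs.1; omega
  rw [pv_dset_norm g y x v hy hx h1]
  intro r hr w hw
  rcases List.mem_or_eq_of_mem_set hr with h | h
  · exact hinv r h w hw
  · subst h
    rcases List.mem_or_eq_of_mem_set hw with h' | h'
    · exact hinv _ (List.getElem_mem h1) w h'
    · omega

theorem pv_sum_set (L : List Nat) (n : Nat) (a : Nat) (h : n < L.length) :
    (L.set n a).sum + L[n] = L.sum + a := by
  rw [List.sum_set]
  have hd : L.drop n = L[n] :: L.drop (n + 1) := List.drop_eq_getElem_cons h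
  have hL : (L.take n).sum + (L.drop n).sum = L.sum := by
    rw [← List.sum_append, List.take_append_drop]
  rw [hd] at hL
  simp only [List.sum_cons] at hL
  simp only [if_pos h]
  omega

theorem pv_pot_dset (g : List (List Int)) (y x v : Int) (hs : pvShape g)
    (hy : 0 ≤ y) (hy30 : y < 30) (hx : 0 ≤ x) (hx30 : x < 30)
    (hcur : dget g y x = -1) (hv : v ≠ -1) :
    pvPot (dset g y x v) + 1 = pvPot g := by
  have h1 : y.toNat < g.length := by have := hs.1; omega
  have h2 : x.toNat < (g[y.toNat]).length := by
    rw [hs.2 _ (List.getElem_mem h1)]; omega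
  rw [pv_dget_norm g y x hs hy hy30 hx hx30,
      List.getD_eq_getElem g [] h1, List.getD_eq_getElem _ (-1) h2] at hcur
  rw [pv_dset_norm g y x v hy hx h1]
  unfold pvPot
  rw [List.map_set]
  have hn : y.toNat < (g.map (fun r => r.countP (fun v => v == (-1 : Int)))).length := by
    simpa using h1
  have hsum := pv_sum_set (g.map (fun r => r.countP (fun v => v == (-1 : Int)))) y.toNat
      ((g[y.toNat].set x.toNat v).countP (fun v => v == (-1 : Int))) hn
  have hget : (g.map (fun r => r.countP (fun v => v == (-1 : Int))))[y.toNat] =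
      g[y.toNat].countP (fun v => v == (-1 : Int)) := by simp
  rw [hget] at hsum
  have hcp : (g[y.toNat].set x.toNat v).countP (fun v => v == (-1 : Int)) + 1
      = g[y.toNat].countP (fun v => v == (-1 : Int)) := by
    rw [List.countP_set h2]
    have hpos : 0 < g[y.toNat].countP (fun v => v == (-1 : Int)) := by
      rw [List.countP_pos_iff]
      exact ⟨_, List.getElem_mem h2, by simp [hcur]⟩
    simp [hcur, hv]
    omega
  omega

theorem pv_relax_cases (maze : List (List String)) (v : Int)
    (st : List (List Int) × List (Int × Int)) (p : Int × Int) :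
    (¬(0 ≤ p.1 ∧ p.1 < 30 ∧ 0 ≤ p.2 ∧ p.2 < 30 ∧ mget maze p.2 p.1 ≠ "#" ∧ dget st.1 p.2 p.1 = -1)
        ∧ relaxB maze v st p = st)
    ∨ ((0 ≤ p.1 ∧ p.1 < 30 ∧ 0 ≤ p.2 ∧ p.2 < 30 ∧ dget st.1 p.2 p.1 = -1)
        ∧ relaxB maze v st p = (dset st.1 p.2 p.1 v, st.2 ++ [p])) := by
  unfold relaxB
  split_ifs with h
  · exact Or.inr ⟨⟨h.1, h.2.1, h.2.2.1, h.2.2.2.1, h.2.2.2.2.2⟩, rfl⟩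
  · exact Or.inl ⟨h, rfl⟩

theorem pv_relax_SI (maze : List (List String)) (v : Int) (st : List (List Int) × List (Int × Int))
    (p : Int × Int) (hs : pvShape st.1) (hinv : pvInv st.1) (hv : -1 ≤ v) :
    pvShape (relaxB maze v st p).1 ∧ pvInv (relaxB maze v st p).1 := by
  rcases pv_relax_cases maze v st p with ⟨_, he⟩ | ⟨⟨c1, c2, c3, c4, c5⟩, he⟩
  · rw [he]; exact ⟨hs, hinv⟩
  · rw [he]
    exact ⟨pv_shape_dset' _ _ _ _ hs c3 c4 c1 c2, pv_inv_dset _ _ _ _ hs hinv c3 c4 c1 c2 hv⟩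

theorem pv_relax_pres (maze : List (List String)) (v : Int) (st : List (List Int) × List (Int × Int))
    (p q : Int × Int) (hs : pvShape st.1) (hq : pvInR q) (w : Int)
    (hd : dget st.1 q.2 q.1 = w) (hw : w ≠ -1) :
    dget (relaxB maze v st p).1 q.2 q.1 = w := by
  rcases pv_relax_cases maze v st p with ⟨_, he⟩ | ⟨⟨c1, c2, c3, c4, c5⟩, he⟩
  · rw [he]; exact hd
  · rw [he]
    obtain ⟨q1, q2, q3, q4⟩ := hq
    by_cases hqp : q.2 = p.2 ∧ q.1 = p.1
    · rw [hqp.1, hqp.2] at hd; rw [hd] at c5; exact absurd c5 hw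
    · rw [pv_dget_dset_ne st.1 p.2 p.1 v q.2 q.1 hs c3 c4 c1 c2 q3 q4 q1 q2 hqp]
      exact hd

theorem pv_relax_pot (maze : List (List String)) (v : Int) (st : List (List Int) × List (Int × Int))
    (p : Int × Int) (hs : pvShape st.1) (hv : v ≠ -1) :
    pvPot (relaxB maze v st p).1 + (relaxB maze v st p).2.length = pvPot st.1 + st.2.length := by
  rcases pv_relax_cases maze v st p with ⟨_, he⟩ | ⟨⟨c1, c2, c3, c4, c5⟩, he⟩
  · rw [he]
  · rw [he]
    have := pv_pot_dset st.1 p.2 p.1 v hs c3 c4 c1 c2 c5 hv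
    simp only [List.length_append, List.length_cons, List.length_nil]
    omega

theorem pv_relax_accval (maze : List (List String)) (v : Int) (st : List (List Int) × List (Int × Int))
    (p : Int × Int) (hs : pvShape st.1) (hv : v ≠ -1)
    (hacc : ∀ c ∈ st.2, pvInR c ∧ dget st.1 c.2 c.1 = v) :
    ∀ c ∈ (relaxB maze v st p).2, pvInR c ∧ dget (relaxB maze v st p).1 c.2 c.1 = v := by
  intro c hc
  rcases pv_relax_cases maze v st p with ⟨_, he⟩ | ⟨⟨c1, c2, c3, c4, c5⟩, he⟩
  · rw [he] at hc ⊢; exact hacc c hc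
  · rw [he] at hc ⊢
    simp only [List.mem_append, List.mem_singleton] at hc
    rcases hc with hc | hc
    · obtain ⟨hin, hval⟩ := hacc c hc
      exact ⟨hin, he ▸ pv_relax_pres maze v st p c hs hin v hval hv⟩
    · refine ⟨?_, ?_⟩
      · rw [hc]; exact ⟨c1, c2, c3, c4⟩
      · rw [hc]; exact pv_dget_dset_self st.1 p.2 p.1 v hs c3 c4 c1 c2

theorem pv_relax_shift (maze : List (List String)) (v : Int) (dis : List (List Int))
    (a b : List (Int × Int)) (p : Int × Int) :
    relaxB maze v (dis, a ++ b) p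
      = ((relaxB maze v (dis, b) p).1, a ++ (relaxB maze v (dis, b) p).2) := by
  unfold relaxB
  dsimp only
  split_ifs with h
  · simp
  · rfl

theorem pv_rfold_SI (maze : List (List String)) (v : Int) (ps : List (Int × Int)) :
    ∀ st, pvShape st.1 → pvInv st.1 → -1 ≤ v →
      pvShape (pvRfold maze v st ps).1 ∧ pvInv (pvRfold maze v st ps).1 := by
  induction ps with
  | nil => intro st hs hi hv; exact ⟨hs, hi⟩
  | cons p ps ih =>
    intro st hs hi hv
    have h := pv_relax_SI maze v st p hs hi hv
    exact ih (relaxB maze v st p) h.1 h.2 hv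

theorem pv_rfold_pres (maze : List (List String)) (v : Int) (ps : List (Int × Int)) :
    ∀ st, pvShape st.1 → pvInv st.1 → -1 ≤ v → ∀ q, pvInR q → ∀ w, w ≠ -1 →
      dget st.1 q.2 q.1 = w → dget (pvRfold maze v st ps).1 q.2 q.1 = w := by
  induction ps with
  | nil => intro st _ _ _ q _ w _ hd; exact hd
  | cons p ps ih =>
    intro st hs hi hv q hq w hw hd
    have h := pv_relax_SI maze v st p hs hi hv
    exact ih (relaxB maze v st p) h.1 h.2 hv q hq w hw
      (pv_relax_pres maze v st p q hs hq w hd hw)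

theorem pv_rfold_pot (maze : List (List String)) (v : Int) (ps : List (Int × Int)) :
    ∀ st, pvShape st.1 → pvInv st.1 → -1 ≤ v → v ≠ -1 →
      pvPot (pvRfold maze v st ps).1 + (pvRfold maze v st ps).2.length = pvPot st.1 + st.2.length := by
  induction ps with
  | nil => intro st _ _ _ _; rfl
  | cons p ps ih =>
    intro st hs hi hv hv'
    have h := pv_relax_SI maze v st p hs hi hv
    have h1 := ih (relaxB maze v st p) h.1 h.2 hv hv'
    have h2 := pv_relax_pot maze v st p hs hv'
    show pvPot (pvRfold maze v (relaxB maze v st p) ps).1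
        + (pvRfold maze v (relaxB maze v st p) ps).2.length = _
    omega

theorem pv_rfold_accval (maze : List (List String)) (v : Int) (ps : List (Int × Int)) :
    ∀ st, pvShape st.1 → pvInv st.1 → -1 ≤ v → v ≠ -1 →
      (∀ c ∈ st.2, pvInR c ∧ dget st.1 c.2 c.1 = v) →
      ∀ c ∈ (pvRfold maze v st ps).2, pvInR c ∧ dget (pvRfold maze v st ps).1 c.2 c.1 = v := by
  induction ps with
  | nil => intro st _ _ _ _ hacc; exact hacc
  | cons p ps ih =>
    intro st hs hi hv hv' hacc
    have h := pv_relax_SI maze v st p hs hi hv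
    exact ih (relaxB maze v st p) h.1 h.2 hv hv'
      (pv_relax_accval maze v st p hs hv' hacc)

theorem pv_rfold_shift (maze : List (List String)) (v : Int) (ps : List (Int × Int)) :
    ∀ dis a b, pvRfold maze v (dis, a ++ b) ps
      = ((pvRfold maze v (dis, b) ps).1, a ++ (pvRfold maze v (dis, b) ps).2) := by
  induction ps with
  | nil => intro dis a b; rfl
  | cons p ps ih =>
    intro dis a b
    show pvRfold maze v (relaxB maze v (dis, a ++ b) p) ps = _
    rw [pv_relax_shift]
    have hch : pvRfold maze v (dis, b) (p :: ps) = pvRfold maze v (relaxB maze v (dis, b) p) ps := rfl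
    rw [hch]
    rcases hr : relaxB maze v (dis, b) p with ⟨dis', acc'⟩
    exact ih dis' a acc'

theorem pv_bodyA_eq_relax (maze : List (List String)) (cx cy d : Int)
    (st : List (List Int) × List (Int × Int)) (i : Int) (hd : dget st.1 cy cx = d) :
    bodyA maze cx cy st i
      = relaxB maze (d + 1) st (cx + (PySem.List.pyGet? dxs i).getD 0, cy + (PySem.List.pyGet? dys i).getD 0) := by
  unfold bodyA relaxB
  dsimp only
  rw [hd]

theorem pv_afold_eq_rfold (maze : List (List String)) (cx cy d : Int) (is : List Int) :
    ∀ st, pvShape st.1 → pvInv st.1 → 0 ≤ d → pvInR (cx, cy) → dget st.1 cy cx = d →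
      is.foldl (bodyA maze cx cy) st
        = pvRfold maze (d + 1) st
            (is.map (fun i => (cx + (PySem.List.pyGet? dxs i).getD 0, cy + (PySem.List.pyGet? dys i).getD 0))) := by
  induction is with
  | nil => intro st _ _ _ _ _; rfl
  | cons i is ih =>
    intro st hs hi hd0 hin hd
    rw [List.foldl_cons, List.map_cons, pv_bodyA_eq_relax maze cx cy d st i hd]
    have h := pv_relax_SI maze (d + 1) st
      (cx + (PySem.List.pyGet? dxs i).getD 0, cy + (PySem.List.pyGet? dys i).getD 0) hs hi (by omega)
    have hpres := pv_relax_pres maze (d + 1) st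
      (cx + (PySem.List.pyGet? dxs i).getD 0, cy + (PySem.List.pyGet? dys i).getD 0)
      (cx, cy) hs hin d hd (by omega)
    exact ih _ h.1 h.2 hd0 hin hpres

theorem pv_nbrs_map (cx cy : Int) :
    [(0 : Int), 1, 2, 3].map (fun i => (cx + (PySem.List.pyGet? dxs i).getD 0, cy + (PySem.List.pyGet? dys i).getD 0))
      = pvNbrs (cx, cy) := by
  have e0 : (PySem.List.pyGet? dxs 0).getD 0 = 0 := by decide
  have e1 : (PySem.List.pyGet? dxs 1).getD 0 = 0 := by decide
  have e2 : (PySem.List.pyGet? dxs 2).getD 0 = 1 := by decide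
  have e3 : (PySem.List.pyGet? dxs 3).getD 0 = -1 := by decide
  have f0 : (PySem.List.pyGet? dys 0).getD 0 = 1 := by decide
  have f1 : (PySem.List.pyGet? dys 1).getD 0 = -1 := by decide
  have f2 : (PySem.List.pyGet? dys 2).getD 0 = 0 := by decide
  have f3 : (PySem.List.pyGet? dys 3).getD 0 = 0 := by decide
  simp only [List.map_cons, List.map_nil, e0, e1, e2, e3, f0, f1, f2, f3, pvNbrs]
  norm_num [Prod.ext_iff]
  constructor <;> omega

theorem pv_bfsA_nil (maze : List (List String)) (f : Nat) (dis : List (List Int)) :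
    bfsA maze f dis [] = dis := by
  cases f <;> rfl

theorem pv_bfsB_nil (maze : List (List String)) (f : Nat) (dis : List (List Int)) (d : Int) :
    bfsB maze f dis [] d = dis := by
  cases f <;> simp [bfsB]

theorem pv_foldl_stepB (maze : List (List String)) (v : Int) (fr : List (Int × Int)) :
    ∀ st, fr.foldl (stepB maze v) st = pvRfold maze v st (fr.flatMap pvNbrs) := by
  induction fr with
  | nil => intro st; rfl
  | cons c fr ih =>
    intro st
    rw [List.foldl_cons, List.flatMap_cons]
    unfold pvRfold
    rw [List.foldl_append]
    exact ih (stepB maze v st c)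

theorem pv_expandA (maze : List (List String)) (d : Int) (rest : List (Int × Int)) :
    ∀ dis nxt (fA : Nat), rest.length ≤ fA → pvShape dis → pvInv dis → 0 ≤ d →
      (∀ c ∈ rest, pvInR c ∧ dget dis c.2 c.1 = d) →
      bfsA maze fA dis (rest ++ nxt)
        = bfsA maze (fA - rest.length)
            (pvRfold maze (d + 1) (dis, nxt) (rest.flatMap pvNbrs)).1
            (pvRfold maze (d + 1) (dis, nxt) (rest.flatMap pvNbrs)).2 := by
  induction rest with
  | nil => intro dis nxt fA _ _ _ _ _; simp [pvRfold]
  | cons c rest ih =>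
    intro dis nxt fA hf hs hi hd0 hvals
    obtain ⟨cx, cy⟩ := c
    rcases fA with _ | f
    · simp at hf
    have hrange : PySem.List.pyRange 0 4 1 = [0, 1, 2, 3] := by decide
    have hcxy := hvals (cx, cy) (List.mem_cons_self)
    show bfsA maze (f + 1) dis ((cx, cy) :: (rest ++ nxt)) = _
    rw [bfsA, hrange]
    rw [pv_afold_eq_rfold maze cx cy d [0, 1, 2, 3] (dis, rest ++ nxt) hs hi hd0 hcxy.1 hcxy.2,
        pv_nbrs_map]
    rw [show ((dis, rest ++ nxt) : List (List Int) × List (Int × Int))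
          = (dis, rest ++ nxt) from rfl]
    rw [pv_rfold_shift maze (d + 1) (pvNbrs (cx, cy)) dis rest nxt]
    rcases hS : pvRfold maze (d + 1) (dis, nxt) (pvNbrs (cx, cy)) with ⟨D1, N1⟩
    have hSI := pv_rfold_SI maze (d + 1) (pvNbrs (cx, cy)) (dis, nxt) hs hi (by omega)
    rw [hS] at hSI
    have hvals' : ∀ c' ∈ rest, pvInR c' ∧ dget D1 c'.2 c'.1 = d := by
      intro c' hc'
      obtain ⟨hin, hval⟩ := hvals c' (List.mem_cons_of_mem _ hc')
      refine ⟨hin, ?_⟩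
      have := pv_rfold_pres maze (d + 1) (pvNbrs (cx, cy)) (dis, nxt) hs hi (by omega)
        c' hin d (by omega) hval
      rw [hS] at this
      exact this
    have := ih D1 N1 f (by simpa using hf) hSI.1 hSI.2 hd0 hvals'
    rw [this]
    have hflat : ((cx, cy) :: rest).flatMap pvNbrs = pvNbrs (cx, cy) ++ rest.flatMap pvNbrs :=
      List.flatMap_cons ..
    rw [hflat]
    unfold pvRfold
    rw [List.foldl_append]
    show bfsA maze (f - rest.length) _ _ = bfsA maze (f + 1 - (rest.length + 1)) _ _
    rw [show f + 1 - (rest.length + 1) = f - rest.length by omega]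
    rw [show (pvNbrs (cx, cy)).foldl (relaxB maze (d + 1)) (dis, nxt) = (D1, N1) from hS]

theorem pv_level (maze : List (List String)) : ∀ (n : Nat) (dis : List (List Int))
    (fr : List (Int × Int)) (d : Int) (fA fB : Nat),
    pvPot dis = n → pvShape dis → pvInv dis → 0 ≤ d →
    (∀ c ∈ fr, pvInR c ∧ dget dis c.2 c.1 = d) →
    fr.length + pvPot dis ≤ fA → pvPot dis + 1 ≤ fB →
    bfsA maze fA dis fr = bfsB maze fB dis fr d := by
  intro n
  induction n using Nat.strong_induction_on with
  | _ n ih =>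
    intro dis fr d fA fB hpot hs hi hd0 hvals hfA hfB
    rcases fr with _ | ⟨c, fr'⟩
    · rw [pv_bfsA_nil, pv_bfsB_nil]
    rcases fB with _ | fb
    · omega
    rw [bfsB]
    simp only [List.isEmpty_cons, if_neg (by simp : ¬(false = true))]
    rw [pv_foldl_stepB maze (d + 1) (c :: fr') (dis, [])]
    have hA := pv_expandA maze d (c :: fr') dis [] fA (by simp at hfA ⊢; omega) hs hi hd0 hvals
    rw [List.append_nil] at hA
    rw [hA]
    rcases hS : pvRfold maze (d + 1) (dis, []) ((c :: fr').flatMap pvNbrs) with ⟨D1, N1⟩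
    have hSI := pv_rfold_SI maze (d + 1) ((c :: fr').flatMap pvNbrs) (dis, []) hs hi (by omega)
    rw [hS] at hSI
    have hpotS := pv_rfold_pot maze (d + 1) ((c :: fr').flatMap pvNbrs) (dis, []) hs hi
      (by omega) (by omega)
    rw [hS] at hpotS
    simp at hpotS
    have haccv := pv_rfold_accval maze (d + 1) ((c :: fr').flatMap pvNbrs) (dis, []) hs hi
      (by omega) (by omega) (by simp)
    rw [hS] at haccv
    by_cases hN : N1 = []
    · rw [hN]
      exact (pv_bfsA_nil maze _ D1).trans (pv_bfsB_nil maze fb D1 (d + 1)).symm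
    · have hlen : 1 ≤ N1.length := by
        cases N1
        · exact absurd rfl hN
        · simp
      have hlt : pvPot D1 < n := by omega
      exact ih (pvPot D1) hlt D1 N1 (d + 1) (fA - (c :: fr').length) fb rfl hSI.1 hSI.2
        (by omega) haccv (by simp at hfA ⊢; omega) (by omega)

theorem pv_findT_bounds (maze : List (List String)) (x y : Int)
    (h : findT maze = some (x, y)) : 0 ≤ x ∧ x < 30 ∧ 0 ≤ y ∧ y < 30 := by
  unfold findT at h
  obtain ⟨yy, hyy, h2⟩ := List.exists_of_findSome?_eq_some h
  obtain ⟨xx, hxx, h3⟩ := List.exists_of_findSome?_eq_some h2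
  rw [PySem.List.mem_pyRange_one] at hyy hxx
  split_ifs at h3 with ht
  obtain ⟨hx, hy⟩ := Prod.mk.injEq .. ▸ Option.some.injEq .. ▸ h3
  omega

theorem pv_shape_init : pvShape pvDisInit := by
  constructor
  · simp [pvDisInit]
  · intro r hr
    rw [List.eq_of_mem_replicate hr]
    simp

theorem pv_inv_init : pvInv pvDisInit := by
  intro r hr v hv
  rw [List.eq_of_mem_replicate hr] at hv
  rw [List.eq_of_mem_replicate hv]

theorem pv_pot_init : pvPot pvDisInit = 900 := by decide

theorem pv_dget_init (y x : Int) (hy : 0 ≤ y) (hy30 : y < 30) (hx : 0 ≤ x) (hx30 : x < 30) :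
    dget pvDisInit y x = -1 := by
  rw [pv_dget_norm pvDisInit y x pv_shape_init hy hy30 hx hx30]
  have h1 : y.toNat < pvDisInit.length := by rw [pv_shape_init.1]; omega
  rw [List.getD_eq_getElem pvDisInit [] h1]
  have hrow : pvDisInit[y.toNat]'h1 = List.replicate 30 (-1 : Int) := by
    simp only [pvDisInit, List.getElem_replicate]
  rw [hrow]
  have h2 : x.toNat < (List.replicate 30 (-1 : Int)).length := by
    rw [List.length_replicate]; omega
  rw [List.getD_eq_getElem _ (-1) h2]
  simp only [List.getElem_replicate]

theorem pv_main (maze : List (List String)) :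
    compute_distance_to_target maze = compute_distance_to_target_alt maze := by
  unfold compute_distance_to_target compute_distance_to_target_alt
  rcases h : findT maze with _ | ⟨x, y⟩
  · rfl
  obtain ⟨hx, hx30, hy, hy30⟩ := pv_findT_bounds maze x y h
  have hs0 := pv_shape_dset' pvDisInit y x 0 pv_shape_init hy hy30 hx hx30
  have hi0 := pv_inv_dset pvDisInit y x 0 pv_shape_init pv_inv_init hy hy30 hx hx30 (by omega)
  have hpot : pvPot (dset pvDisInit y x 0) + 1 = 900 := by
    rw [pv_pot_dset pvDisInit y x 0 pv_shape_init hy hy30 hx hx30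
      (pv_dget_init y x hy hy30 hx hx30) (by omega), pv_pot_init]
  have hval : ∀ c ∈ [(x, y)], pvInR c ∧ dget (dset pvDisInit y x 0) c.2 c.1 = 0 := by
    intro c hc
    rw [List.mem_singleton] at hc
    subst hc
    exact ⟨⟨hx, hx30, hy, hy30⟩, pv_dget_dset_self pvDisInit y x 0 pv_shape_init hy hy30 hx hx30⟩
  exact pv_level maze (pvPot (dset pvDisInit y x 0)) (dset pvDisInit y x 0) [(x, y)] 0 1000 1000
    rfl hs0 hi0 le_rfl hval (by simp; omega) (by omega)

-- ===== VERDICT (by name: the statement is the Claim_ definition above) =====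
theorem compute_distance_to_target_spec : Claim_equal_compute_distance_to_target := by
  intro maze _ _
  unfold Spec_compute_distance_to_target
  exact pv_main maze
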